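-- pv_equiv track=rewrite | github.com/MCondeG/DAM | CURSO2/1/SGE/Python/Clase 4 - Actividad/libFunc.py | cuad
-- ===== SOURCE A (Python) =====
-- def cuad(n):
--
--     suma = 0
--
--     for x in range(1, n*2, 2):
--         suma += x
--
--     if (n**2 == suma):
--         return True
--     else:
--         return False
-- ===== SOURCE B (Python) =====
-- def cuad(n):
--     # Closed form: the sum of the first n odd numbers equals n squared,
--     # so the check succeeds exactly when n is nonnegative.
--     return n >= 0
-- ===== Notes on version B (the rewrite author's own statement) =====
-- stated objective: faster
-- what changed: Replaced the O(n) loop summing the first n odd numbers with the closed form: the equality n**2 == sum holds exactly when n >= 0, so B returns n >= 0 directly.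
import Mathlib
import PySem

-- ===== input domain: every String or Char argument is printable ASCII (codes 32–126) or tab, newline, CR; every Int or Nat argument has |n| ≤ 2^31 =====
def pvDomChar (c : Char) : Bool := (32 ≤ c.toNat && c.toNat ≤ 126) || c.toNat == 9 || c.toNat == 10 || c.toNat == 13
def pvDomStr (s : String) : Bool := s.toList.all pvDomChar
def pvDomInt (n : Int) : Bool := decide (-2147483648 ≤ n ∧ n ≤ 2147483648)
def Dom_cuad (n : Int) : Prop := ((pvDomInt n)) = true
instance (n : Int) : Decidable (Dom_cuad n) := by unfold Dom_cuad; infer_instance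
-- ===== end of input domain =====

-- B replaces A's linear odd-number-summing loop with a closed form: the check holds exactly for nonnegative n.

-- ===== PORT A =====
def cuad (n : Int) : Bool :=
  let suma : Int := (PySem.List.pyRange 1 (n * 2) 2).foldl (fun acc x => acc + x) 0
  if n ^ 2 = suma then true else false

-- ===== PORT B =====
def cuad_alt (n : Int) : Bool := decide (0 ≤ n)

-- ===== PRECONDITION & SPEC =====
def Spec_cuad (n : Int) (out : Bool) : Prop := out = cuad_alt n
instance (n : Int) (out : Bool) : Decidable (Spec_cuad n out) := by unfold Spec_cuad; infer_instance

-- ===== CLAIM (what is proved, stated in full; the proofs are below) =====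
def Claim_equal_cuad : Prop := ∀ (n : Int), Dom_cuad n → Spec_cuad n (cuad n)

-- ===== LEMMAS AND PROOFS =====

-- the loop's sum: Σ_{k<m} (1 + 2k) = m²
theorem sum_odds (m : Nat) :
    ((List.range m).map (fun k : Nat => (1 : Int) + 2 * (k : Int))).foldl (fun acc x => acc + x) 0
      = (m : Int) ^ 2 := by
  induction m with
  | zero => simp
  | succ m ih =>
    rw [List.range_succ, List.map_append, List.foldl_append, ih]
    push_cast
    simp
    ring

theorem cuad_eq (n : Int) : cuad n = decide (0 ≤ n) := by
  unfold cuad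
  rw [PySem.List.pyRange_of_pos 1 (n * 2) (by norm_num)]
  by_cases h : 0 < n
  · have h1 : (1 : Int) < n * 2 := by omega
    have h2 : (n * 2 - 1 + 2 - 1) / 2 = n := by omega
    rw [if_pos h1, h2]
    have h3 : (n.toNat : Int) = n := Int.toNat_of_nonneg h.le
    rw [sum_odds n.toNat, h3]
    simp [h.le]
  · have h1 : ¬ (1 : Int) < n * 2 := by omega
    rw [if_neg h1]
    simp only [List.range_zero, List.map_nil, List.foldl_nil]
    by_cases hz : n = 0
    · subst hz; norm_num
    · have hne : n ^ 2 ≠ 0 := pow_ne_zero _ hz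
      have hn : ¬ (0 : Int) ≤ n := by omega
      simp [hne, hn]

-- ===== VERDICT (by name: the statement is the Claim_ definition above) =====
theorem cuad_spec : Claim_equal_cuad := by
  intro n _
  unfold Spec_cuad cuad_alt
  exact cuad_eq n
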